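-- pv_equiv track=rewrite | github.com/ashaikhouni/slicer-rosa-helper | PostopCTLocalization/postop_ct_localization/deep_core_widget.py | _format_deep_core_proposal_family_counts
-- ===== SOURCE A (Python) =====
-- def _format_deep_core_proposal_family_counts(proposals):
--     proposal_list = list(proposals or [])
--     if not proposal_list:
--         return "none"
--     ordered_families = (
--         "graph",
--         "blob_connectivity",
--         "blob_axis",
--     )
--     counts = {}
--     for proposal in proposal_list:
--         family = str(proposal.get("proposal_family") or "unknown")
--         counts[family] = int(counts.get(family, 0)) + 1
--     parts = []
--     for family in ordered_families:
--         count = int(counts.pop(family, 0))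
--         if count > 0:
--             parts.append(f"{family}={count}")
--     for family in sorted(counts.keys()):
--         parts.append(f"{family}={int(counts[family])}")
--     return ", ".join(parts) if parts else "none"
-- ===== SOURCE B (Python) =====
-- def _format_deep_core_proposal_family_counts(proposals):
--     proposal_list = list(proposals or [])
--     if not proposal_list:
--         return "none"
--     counts = {}
--     for proposal in proposal_list:
--         family = str(proposal.get("proposal_family") or "unknown")
--         counts[family] = counts.get(family, 0) + 1
--     priority = {"graph": "0", "blob_connectivity": "1", "blob_axis": "2"}
--     families = sorted(counts, key=lambda family: priority.get(family, "3" + family))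
--     return ", ".join("%s=%d" % (family, counts[family]) for family in families)
-- ===== Notes on version B (the rewrite author's own statement) =====
-- stated objective: simpler
-- what changed: A's two-stage output (loop over a fixed family tuple with dict.pop and a count>0 guard, then a second loop over the sorted leftover keys) is replaced by one keyed sort of all counted families -- known families map to priority keys "0"/"1"/"2", all others to "3"+name -- followed by a single format-and-join pass.
import Mathlib
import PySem

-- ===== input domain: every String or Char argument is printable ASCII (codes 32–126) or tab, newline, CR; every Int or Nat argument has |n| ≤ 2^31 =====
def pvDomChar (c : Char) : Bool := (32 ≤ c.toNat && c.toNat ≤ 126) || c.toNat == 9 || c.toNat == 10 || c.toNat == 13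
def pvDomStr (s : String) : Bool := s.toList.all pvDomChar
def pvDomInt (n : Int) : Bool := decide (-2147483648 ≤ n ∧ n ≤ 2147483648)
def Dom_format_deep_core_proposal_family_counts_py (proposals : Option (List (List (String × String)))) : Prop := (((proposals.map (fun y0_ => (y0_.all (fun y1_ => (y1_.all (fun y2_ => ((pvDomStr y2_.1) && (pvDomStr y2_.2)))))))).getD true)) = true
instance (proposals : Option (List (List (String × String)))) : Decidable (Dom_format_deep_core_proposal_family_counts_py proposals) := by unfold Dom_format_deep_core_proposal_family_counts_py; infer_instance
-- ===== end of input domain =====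

-- B replaces A's two output loops (pop of a fixed family tuple with a count>0 guard, then sorted leftovers)
-- by a single priority-keyed sort of all counted families; objective: simpler.

-- ===== PORT A =====
-- shared helper: str(proposal.get("proposal_family") or "unknown") — the identical line occurs in both Pythons
def pvFamily (proposal : List (String × String)) : String :=
  match proposal.find? (fun q => q.1 == "proposal_family") with
  | some q => if q.2 = "" then "unknown" else q.2
  | none => "unknown"

-- one iteration of A's `for family in ordered_families:` loop; counts.pop(family, 0) = read with default, then erase
def pvPopStep (st : PySem.Dict String Int × List String) (family : String) :
    PySem.Dict String Int × List String :=
  let count := st.1.getD family 0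
  let counts := st.1.erase family
  if count > 0 then (counts, st.2 ++ [family ++ "=" ++ PySem.Int.toStr count])
  else (counts, st.2)

def format_deep_core_proposal_family_counts_py (proposals : Option (List (List (String × String)))) : String :=
  let proposal_list := proposals.getD []
  if proposal_list = [] then "none"
  else
    let counts : PySem.Dict String Int :=
      proposal_list.foldl (fun counts proposal =>
        let family := pvFamily proposal
        counts.insert family (counts.getD family 0 + 1)) PySem.Dict.empty
    let st := ["graph", "blob_connectivity", "blob_axis"].foldl pvPopStep (counts, [])
    -- counts[family]: family ranges over the remaining keys, so the lookup cannot miss; read as getD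
    let parts := (PySem.List.sorted st.1.keys (fun k => k)).foldl
      (fun parts family => parts ++ [family ++ "=" ++ PySem.Int.toStr (st.1.getD family 0)]) st.2
    if parts = [] then "none" else PySem.Str.join ", " parts

-- ===== PORT B =====
def format_deep_core_proposal_family_counts_py_alt (proposals : Option (List (List (String × String)))) : String :=
  let proposal_list := proposals.getD []
  if proposal_list = [] then "none"
  else
    let counts : PySem.Dict String Int :=
      proposal_list.foldl (fun counts proposal =>
        let family := pvFamily proposal
        counts.insert family (counts.getD family 0 + 1)) PySem.Dict.empty
    let priority : PySem.Dict String String :=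
      PySem.Dict.ofList [("graph", "0"), ("blob_connectivity", "1"), ("blob_axis", "2")]
    let families := PySem.List.sorted counts.keys
      (fun family => priority.getD family ("3" ++ family))
    PySem.Str.join ", "
      (families.map (fun family => family ++ "=" ++ PySem.Int.toStr (counts.getD family 0)))

-- ===== PRECONDITION & SPEC =====
def Spec_format_deep_core_proposal_family_counts_py (proposals : Option (List (List (String × String)))) (out : String) : Prop := out = format_deep_core_proposal_family_counts_py_alt proposals
instance (proposals : Option (List (List (String × String)))) (out : String) : Decidable (Spec_format_deep_core_proposal_family_counts_py proposals out) := by unfold Spec_format_deep_core_proposal_family_counts_py; infer_instance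

-- ===== CLAIM (what is proved, stated in full; the proofs are below) =====
def Claim_equal_format_deep_core_proposal_family_counts_py : Prop := ∀ (proposals : Option (List (List (String × String)))), Dom_format_deep_core_proposal_family_counts_py proposals → Spec_format_deep_core_proposal_family_counts_py proposals (format_deep_core_proposal_family_counts_py proposals)

-- ===== LEMMAS AND PROOFS =====

-- the key function of B, written out
def pvKeyFn (f : String) : String :=
  if f = "graph" then "0"
  else if f = "blob_connectivity" then "1"
  else if f = "blob_axis" then "2"
  else "3" ++ f

def pvIsKnown (f : String) : Bool :=
  f == "graph" || f == "blob_connectivity" || f == "blob_axis"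

lemma pv_getD_priority (f : String) :
    (PySem.Dict.ofList [("graph", "0"), ("blob_connectivity", "1"), ("blob_axis", "2")]
      : PySem.Dict String String).getD f ("3" ++ f) = pvKeyFn f := by
  have h : (PySem.Dict.ofList [("graph", "0"), ("blob_connectivity", "1"), ("blob_axis", "2")]
      : PySem.Dict String String) = PySem.Dict.mk [("graph", "0"), ("blob_connectivity", "1"), ("blob_axis", "2")] := rfl
  rw [h, PySem.Dict.getD_eq_get?_getD]
  by_cases h1 : f = "graph"
  · subst h1; rfl
  by_cases h2 : f = "blob_connectivity"
  · subst h2; rfl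
  by_cases h3 : f = "blob_axis"
  · subst h3; rfl
  have e1 : (("graph" : String) == f) = false := beq_eq_false_iff_ne.mpr (Ne.symm h1)
  have e2 : (("blob_connectivity" : String) == f) = false := beq_eq_false_iff_ne.mpr (Ne.symm h2)
  have e3 : (("blob_axis" : String) == f) = false := beq_eq_false_iff_ne.mpr (Ne.symm h3)
  have e0 : (PySem.Dict.mk ([] : List (String × String))).get? f = none := rfl
  simp [PySem.Dict.get?_mk_cons, e0, e1, e2, e3, pvKeyFn, h1, h2, h3]

lemma pv_counts_eq (l : List (List (String × String))) :
    l.foldl (fun counts proposal =>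
        let family := pvFamily proposal
        counts.insert family (counts.getD family 0 + 1)) PySem.Dict.empty
      = PySem.Dict.counter (l.map pvFamily) := by
  rw [← PySem.Dict.foldl_insert_getD_add_one_eq_counter, List.foldl_map]

lemma pv_get?_mk_filter_ne (l : List (String × Int)) (k k' : String) (h : k' ≠ k) :
    (PySem.Dict.mk (l.filter (fun p => !(p.1 == k)))).get? k' = (PySem.Dict.mk l).get? k' := by
  induction l with
  | nil => rfl
  | cons a t ih =>
    by_cases ha : a.1 = k
    · have hne : (a.1 == k') = false := beq_eq_false_iff_ne.mpr (fun hh => h (hh.symm.trans ha))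
      have h1 : (a :: t).filter (fun p => !(p.1 == k)) = t.filter (fun p => !(p.1 == k)) := by
        simp [ha]
      rw [h1, ih]
      show _ = (PySem.Dict.mk (a :: t)).get? k'
      rw [PySem.Dict.get?_mk_cons, hne]
      simp
    · have h1 : (a :: t).filter (fun p => !(p.1 == k)) = a :: t.filter (fun p => !(p.1 == k)) := by
        simp [ha]
      rw [h1]
      show (PySem.Dict.mk (a :: t.filter (fun p => !(p.1 == k)))).get? k'
          = (PySem.Dict.mk (a :: t)).get? k'
      rw [PySem.Dict.get?_mk_cons, PySem.Dict.get?_mk_cons, ih]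

lemma pv_getD_erase_ne (d : PySem.Dict String Int) (k k' : String) (h : k' ≠ k) (v : Int) :
    (d.erase k).getD k' v = d.getD k' v := by
  rw [PySem.Dict.getD_eq_get?_getD, PySem.Dict.getD_eq_get?_getD]
  have : (d.erase k).get? k' = d.get? k' := pv_get?_mk_filter_ne d.items k k' h
  rw [this]

lemma pv_keys_erase (d : PySem.Dict String Int) (k : String) :
    (d.erase k).keys = d.keys.filter (fun x => !(x == k)) := by
  show (d.items.filter (fun p => !(p.1 == k))).map Prod.fst = (d.items.map Prod.fst).filter (fun x => !(x == k))
  rw [List.filter_map]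
  rfl

lemma pv_pop_loop (ks : List String) (d : PySem.Dict String Int) (acc : List String)
    (hnd : ks.Nodup) :
    ks.foldl pvPopStep (d, acc)
      = (ks.foldl (fun d k => d.erase k) d,
         acc ++ (ks.filter (fun k => decide (d.getD k 0 > 0))).map
           (fun k => k ++ "=" ++ PySem.Int.toStr (d.getD k 0))) := by
  induction ks generalizing d acc with
  | nil => simp
  | cons k t ih =>
    have hk : k ∉ t := (List.nodup_cons.mp hnd).1
    have ht : t.Nodup := (List.nodup_cons.mp hnd).2
    have hstep : ∀ x ∈ t, (d.erase k).getD x 0 = d.getD x 0 := by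
      intro x hx
      exact pv_getD_erase_ne d k x (fun hxy => hk (hxy ▸ hx)) 0
    have hfil : t.filter (fun x => decide ((d.erase k).getD x 0 > 0))
        = t.filter (fun x => decide (d.getD x 0 > 0)) :=
      List.filter_congr (fun x hx => by rw [hstep x hx])
    have hmap : (t.filter (fun x => decide (d.getD x 0 > 0))).map
          (fun x => x ++ "=" ++ PySem.Int.toStr ((d.erase k).getD x 0))
        = (t.filter (fun x => decide (d.getD x 0 > 0))).map
          (fun x => x ++ "=" ++ PySem.Int.toStr (d.getD x 0)) :=
      List.map_congr_left (fun x hx => by rw [hstep x (List.mem_of_mem_filter hx)])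
    by_cases hc : d.getD k 0 > 0
    · have : pvPopStep (d, acc) k = (d.erase k, acc ++ [k ++ "=" ++ PySem.Int.toStr (d.getD k 0)]) := by
        simp [pvPopStep, hc]
      simp [List.foldl_cons, this, ih _ _ ht, hfil, hmap, hc]
    · have : pvPopStep (d, acc) k = (d.erase k, acc) := by
        simp [pvPopStep, hc]
      simp [List.foldl_cons, this, ih _ _ ht, hfil, hmap, hc]

lemma pv_append3_lt (a b : String) (h : a < b) : "3" ++ a < "3" ++ b := by
  rw [String.lt_iff_toList_lt] at h ⊢
  rw [String.toList_append, String.toList_append]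
  show '3' :: a.toList < '3' :: b.toList
  exact List.cons_lt_cons_iff.mpr (Or.inr ⟨rfl, h⟩)

lemma pv_known_lt (s : String) (c : Char) (hs : s.toList = [c]) (hc : c < '3') (b : String) :
    s < "3" ++ b := by
  rw [String.lt_iff_toList_lt, String.toList_append, hs]
  show [c] < '3' :: b.toList
  exact List.cons_lt_cons_iff.mpr (Or.inl hc)

lemma pv_keyFn_unknown (f : String) (h : pvIsKnown f = false) : pvKeyFn f = "3" ++ f := by
  simp only [pvIsKnown, Bool.or_eq_false_iff, beq_eq_false_iff_ne] at h
  simp [pvKeyFn, h.1.1, h.1.2, h.2]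

-- the central sorting identity: one priority-keyed sort = known families in fixed order ++ sorted unknowns
lemma pv_sorted_split (K : List String) (hnd : K.Nodup) :
    PySem.List.sorted K pvKeyFn
      = (["graph", "blob_connectivity", "blob_axis"].filter (fun k => decide (k ∈ K)))
        ++ PySem.List.sorted (K.filter (fun f => !pvIsKnown f)) (fun x => x) := by
  apply PySem.List.sorted_eq_of_perm_of_pairwise_lt
  · -- permutation
    have h1 : (["graph", "blob_connectivity", "blob_axis"].filter (fun k => decide (k ∈ K))).Perm
        (K.filter pvIsKnown) := by
      rw [List.perm_ext_iff_of_nodup ((by decide : (["graph", "blob_connectivity", "blob_axis"] : List String).Nodup).filter _) (hnd.filter _)]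
      intro a
      simp only [List.mem_filter, List.mem_cons, List.not_mem_nil, or_false, decide_eq_true_eq,
        pvIsKnown, Bool.or_eq_true, beq_iff_eq]
      tauto
    have h2 : (PySem.List.sorted (K.filter (fun f => !pvIsKnown f)) (fun x => x)).Perm
        (K.filter (fun f => !pvIsKnown f)) := PySem.List.sorted_perm _ _ _
    exact (h1.append h2).trans (List.filter_append_perm pvIsKnown K)
  · -- pairwise strictly increasing keys
    rw [List.pairwise_append]
    refine ⟨?_, ?_, ?_⟩
    · refine List.Pairwise.filter _ ?_
      have l01 : ("0" : String) < "1" := String.lt_iff_toList_lt.mpr (by decide)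
      have l02 : ("0" : String) < "2" := String.lt_iff_toList_lt.mpr (by decide)
      have l12 : ("1" : String) < "2" := String.lt_iff_toList_lt.mpr (by decide)
      refine List.pairwise_cons.mpr ⟨?_, List.pairwise_cons.mpr ⟨?_, List.pairwise_singleton _ _⟩⟩
      · intro b hb
        simp only [List.mem_cons, List.not_mem_nil, or_false] at hb
        rcases hb with h | h <;> subst h
        · exact l01
        · exact l02
      · intro b hb
        simp only [List.mem_cons, List.not_mem_nil, or_false] at hb
        subst hb
        exact l12
    · have hsub : (PySem.List.sorted (K.filter (fun f => !pvIsKnown f)) (fun x => x)).Nodup := by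
        refine (PySem.List.sorted_perm (K.filter (fun f => !pvIsKnown f)) (fun x => x) false).symm.nodup ?_
        exact hnd.filter _
      have hle : (PySem.List.sorted (K.filter (fun f => !pvIsKnown f)) (fun x => x)).Pairwise
          (fun a b => a ≤ b) := PySem.List.sorted_pairwise _ _
      have hmem : ∀ x ∈ PySem.List.sorted (K.filter (fun f => !pvIsKnown f)) (fun x => x),
          pvIsKnown x = false := by
        intro x hx
        have := ((PySem.List.mem_sorted _ _ _ _).mp hx)
        have := List.mem_filter.mp this
        simpa using this.2
      refine List.Pairwise.imp_of_mem ?_ (hle.and hsub)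
      intro a b ha hb hab
      rw [pv_keyFn_unknown a (hmem a ha), pv_keyFn_unknown b (hmem b hb)]
      exact pv_append3_lt a b (lt_of_le_of_ne hab.1 hab.2)
    · intro a ha b hb
      have hbk : pvIsKnown b = false := by
        have := List.mem_filter.mp (((PySem.List.mem_sorted _ _ _ _).mp hb))
        simpa using this.2
      rw [pv_keyFn_unknown b hbk]
      have ha' := List.mem_of_mem_filter ha
      simp only [List.mem_cons, List.not_mem_nil, or_false] at ha'
      rcases ha' with h | h | h <;> subst h <;>
        [exact pv_known_lt "0" '0' rfl (by decide) b; exact pv_known_lt "1" '1' rfl (by decide) b;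
         exact pv_known_lt "2" '2' rfl (by decide) b]

-- keys of the dict after the three pops
lemma pv_keys_rest (c : PySem.Dict String Int) :
    ((["graph", "blob_connectivity", "blob_axis"].foldl (fun d k => d.erase k) c)).keys
      = c.keys.filter (fun f => !pvIsKnown f) := by
  simp only [List.foldl_cons, List.foldl_nil]
  rw [pv_keys_erase, pv_keys_erase, pv_keys_erase, List.filter_filter, List.filter_filter]
  refine List.filter_congr ?_
  intro x _
  cases h1 : x == "graph" <;> cases h2 : x == "blob_connectivity" <;> cases h3 : x == "blob_axis" <;>
    simp [pvIsKnown, h1, h2, h3]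

lemma pv_getD_rest (c : PySem.Dict String Int) (f : String) (h : pvIsKnown f = false) :
    ((["graph", "blob_connectivity", "blob_axis"].foldl (fun d k => d.erase k) c)).getD f 0
      = c.getD f 0 := by
  simp only [pvIsKnown, Bool.or_eq_false_iff, beq_eq_false_iff_ne] at h
  simp only [List.foldl_cons, List.foldl_nil]
  rw [pv_getD_erase_ne _ _ _ h.2, pv_getD_erase_ne _ _ _ h.1.2, pv_getD_erase_ne _ _ _ h.1.1]

-- the main equality on a nonempty proposal list
lemma pv_main (l : List (List (String × String))) (hl : ¬ l = []) :
    format_deep_core_proposal_family_counts_py (some l)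
      = format_deep_core_proposal_family_counts_py_alt (some l) := by
  unfold format_deep_core_proposal_family_counts_py format_deep_core_proposal_family_counts_py_alt
  simp only [Option.getD_some, if_neg hl, pv_counts_eq]
  set fams := l.map pvFamily with hfams
  have hfne : fams ≠ [] := by simpa [hfams] using hl
  set c := PySem.Dict.counter fams with hc
  have hK : c.keys = PySem.Set.ofList fams := PySem.Dict.keys_counter fams
  have hKnd : c.keys.Nodup := PySem.Dict.nodup_keys_counter fams
  -- B's sort with the priority dict is the sort with pvKeyFn
  have hkey : PySem.List.sorted c.keys
      (fun family => (PySem.Dict.ofList [("graph", "0"), ("blob_connectivity", "1"), ("blob_axis", "2")]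
        : PySem.Dict String String).getD family ("3" ++ family))
      = PySem.List.sorted c.keys pvKeyFn := by
    have : (fun family => (PySem.Dict.ofList [("graph", "0"), ("blob_connectivity", "1"), ("blob_axis", "2")]
        : PySem.Dict String String).getD family ("3" ++ family)) = pvKeyFn := by
      funext f; exact pv_getD_priority f
    rw [this]
  -- A's pop loop
  rw [pv_pop_loop _ c [] (by decide)]
  simp only [List.nil_append]
  -- A's trailing loop is append-of-map
  rw [PySem.List.foldl_append_singleton_eq_map]
  rw [pv_keys_rest c]
  -- rewrite the leftover getDs to c's getDs
  have hmap2 : (PySem.List.sorted (c.keys.filter (fun f => !pvIsKnown f)) (fun k => k)).map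
        (fun family => family ++ "=" ++ PySem.Int.toStr
          ((["graph", "blob_connectivity", "blob_axis"].foldl (fun d k => d.erase k) c).getD family 0))
      = (PySem.List.sorted (c.keys.filter (fun f => !pvIsKnown f)) (fun k => k)).map
        (fun family => family ++ "=" ++ PySem.Int.toStr (c.getD family 0)) := by
    refine List.map_congr_left ?_
    intro x hx
    have hxk : pvIsKnown x = false := by
      have := List.mem_filter.mp ((PySem.List.mem_sorted _ _ _ _).mp hx)
      simpa using this.2
    rw [pv_getD_rest c x hxk]
  rw [hmap2, hkey, pv_sorted_split c.keys hKnd]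
  -- the count>0 filter on knowns is the membership filter
  have hfil : (["graph", "blob_connectivity", "blob_axis"].filter (fun k => decide (c.getD k 0 > 0)))
      = (["graph", "blob_connectivity", "blob_axis"].filter (fun k => decide (k ∈ c.keys))) := by
    refine List.filter_congr ?_
    intro x _
    have : c.getD x 0 = (fams.count x : Int) := PySem.Dict.getD_counter fams x
    simp [this, hK, PySem.Set.mem_ofList, List.count_pos_iff]
  rw [hfil, List.map_append]
  -- the concatenated parts are nonempty, so A's final guard takes the else branch
  have hne : (["graph", "blob_connectivity", "blob_axis"].filter (fun k => decide (k ∈ c.keys))).map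
        (fun k => k ++ "=" ++ PySem.Int.toStr (c.getD k 0))
      ++ (PySem.List.sorted (c.keys.filter (fun f => !pvIsKnown f)) (fun x => x)).map
        (fun family => family ++ "=" ++ PySem.Int.toStr (c.getD family 0)) ≠ [] := by
    intro hemp
    rcases List.append_eq_nil_iff.mp hemp with ⟨h1, h2⟩
    have h1' := List.map_eq_nil_iff.mp h1
    have h2' := List.map_eq_nil_iff.mp h2
    rw [PySem.List.sorted_eq_nil_iff] at h2'
    -- keys nonempty: the first family is a key
    rcases fams with _ | ⟨f0, rest⟩
    · exact hfne rfl
    · have hf0 : f0 ∈ c.keys := by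
        rw [hK]; exact (PySem.Set.mem_ofList _ _).mpr (by simp)
      by_cases hk : pvIsKnown f0
      · have : f0 ∈ (["graph", "blob_connectivity", "blob_axis"] : List String).filter
            (fun k => decide (k ∈ c.keys)) := by
          refine List.mem_filter.mpr ⟨?_, by simpa using hf0⟩
          simp only [pvIsKnown, Bool.or_eq_true, beq_iff_eq] at hk
          simp only [List.mem_cons, List.not_mem_nil, or_false]
          tauto
        rw [h1'] at this
        exact List.not_mem_nil this
      · have : f0 ∈ c.keys.filter (fun f => !pvIsKnown f) := by
          refine List.mem_filter.mpr ⟨hf0, by simp [hk]⟩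
        rw [h2'] at this
        exact List.not_mem_nil this
  rw [if_neg hne]

-- ===== VERDICT (by name: the statement is the Claim_ definition above) =====
theorem format_deep_core_proposal_family_counts_py_spec : Claim_equal_format_deep_core_proposal_family_counts_py := by
  intro proposals _
  show format_deep_core_proposal_family_counts_py proposals
      = format_deep_core_proposal_family_counts_py_alt proposals
  rcases proposals with _ | l
  · rfl
  · by_cases hl : l = []
    · subst hl; rfl
    · exact pv_main l hl
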